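-- pv_equiv track=rewrite | github.com/mrbell/advent_of_code | 2025/day06.py | count_max_spaces
-- ===== SOURCE A (Python) =====
-- def count_max_spaces(line: str) -> int:
--     max_spaces = -1
--     in_spaces = False
--     current_space_count = 0
--
--     for val in line:
--         if not in_spaces and val != ' ':
--             # In a number
--             continue
--         elif not in_spaces and val == ' ':
--             # Transition from number to space
--             in_spaces = True
--             current_space_count = 1
--         elif in_spaces and val == ' ':
--             # In spaces
--             current_space_count += 1
--         else:
--             # Transition from spaces to number
--             if current_space_count > max_spaces:
--                 max_spaces = current_space_count
--             in_spaces = False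
--             current_space_count = 0
--
--     return max_spaces
-- ===== SOURCE B (Python) =====
-- def count_max_spaces(line: str) -> int:
--     # Max gap between consecutive non-space characters (virtual non-space at -1);
--     # a trailing space run has no following non-space so it is never counted.
--     best = -1
--     prev = -1
--     for i, c in enumerate(line):
--         if c != ' ':
--             g = i - prev - 1
--             if g > best and g > 0:
--                 best = g
--             prev = i
--     return best
-- ===== Notes on version B (the rewrite author's own statement) =====
-- stated objective: simpler
-- what changed: B drops A's in_spaces/current_space_count state machine and instead tracks only the index of the previous non-space character, taking the maximum gap between consecutive non-space positions; trailing space runs are never counted because no non-space follows them.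
import Mathlib
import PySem

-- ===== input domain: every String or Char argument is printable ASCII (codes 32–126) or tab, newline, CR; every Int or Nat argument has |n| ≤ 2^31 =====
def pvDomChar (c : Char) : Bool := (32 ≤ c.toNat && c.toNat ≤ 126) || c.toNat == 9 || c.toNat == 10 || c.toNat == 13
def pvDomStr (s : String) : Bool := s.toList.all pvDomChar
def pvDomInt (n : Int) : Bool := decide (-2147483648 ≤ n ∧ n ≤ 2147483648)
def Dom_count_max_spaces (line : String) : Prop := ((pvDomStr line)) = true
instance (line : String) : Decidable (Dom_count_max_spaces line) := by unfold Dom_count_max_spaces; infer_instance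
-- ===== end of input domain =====

-- B replaces A's boolean run state machine by tracking the index of the previous
-- non-space character and taking the max gap between consecutive non-space positions (objective: simpler).


-- ===== PORT A =====
-- state = (max_spaces, in_spaces, current_space_count), branches in A's order
def aStep (st : Int × Bool × Int) (val : Char) : Int × Bool × Int :=
  if ¬ st.2.1 ∧ val ≠ ' ' then st
  else if ¬ st.2.1 ∧ val = ' ' then (st.1, true, 1)
  else if st.2.1 ∧ val = ' ' then (st.1, true, st.2.2 + 1)
  else ((if st.2.2 > st.1 then st.2.2 else st.1), false, 0)

def count_max_spaces (line : String) : Int :=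
  (line.toList.foldl aStep (-1, false, 0)).1

-- ===== PORT B =====
-- enumerate(line) with a start index (Python's enumerate)
def enumFrom (i : Nat) : List Char → List (Nat × Char)
  | [] => []
  | c :: cs => (i, c) :: enumFrom (i + 1) cs

-- state = (best, prev)
def bStep (st : Int × Int) (p : Nat × Char) : Int × Int :=
  if p.2 ≠ ' ' then
    let g : Int := (p.1 : Int) - st.2 - 1
    ((if g > st.1 ∧ g > 0 then g else st.1), (p.1 : Int))
  else st

def count_max_spaces_alt (line : String) : Int :=
  ((enumFrom 0 line.toList).foldl bStep (-1, -1)).1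

-- ===== PRECONDITION & SPEC =====
def Spec_count_max_spaces (line : String) (out : Int) : Prop := out = count_max_spaces_alt line
instance (line : String) (out : Int) : Decidable (Spec_count_max_spaces line out) := by unfold Spec_count_max_spaces; infer_instance

-- ===== CLAIM (what is proved, stated in full; the proofs are below) =====
def Claim_equal_count_max_spaces : Prop := ∀ (line : String), Dom_count_max_spaces line → Spec_count_max_spaces line (count_max_spaces line)

-- ===== LEMMAS AND PROOFS =====
-- Invariant: A's current_space_count equals the gap i - prev - 1 tracked by B,
-- in_spaces ↔ that gap is positive, and the gap is nonnegative.
theorem key (l : List Char) : ∀ (i : Nat) (m prev cnt : Int) (ins : Bool),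
    cnt = (i : Int) - prev - 1 → (ins = true ↔ 0 < cnt) → 0 ≤ cnt →
    (l.foldl aStep (m, ins, cnt)).1 = ((enumFrom i l).foldl bStep (m, prev)).1 := by
  induction l with
  | nil => intro i m prev cnt ins h1 h2 h3; simp [enumFrom]
  | cons c cs ih =>
    intro i m prev cnt ins h1 h2 h3
    simp only [List.foldl_cons, enumFrom]
    by_cases hc : c = ' '
    · have hb : bStep (m, prev) (i, c) = (m, prev) := by simp [bStep, hc]
      rw [hb]
      cases ins with
      | false =>
        have hcnt : cnt = 0 := by
          rcases lt_or_ge 0 cnt with h | h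
          · exact absurd (h2.mpr h) (by simp)
          · omega
        have ha : aStep (m, false, cnt) c = (m, true, 1) := by
          simp [aStep, hc]
        rw [ha]
        refine ih (i + 1) m prev 1 true ?_ (by simp) (by omega)
        push_cast
        omega
      | true =>
        have hpos : 0 < cnt := h2.mp rfl
        have ha : aStep (m, true, cnt) c = (m, true, cnt + 1) := by
          simp [aStep, hc]
        have harg : (cnt + 1 : Int) = ((i + 1 : Nat) : Int) - prev - 1 := by push_cast; omega
        have harg2 : (true = true) ↔ (0 : Int) < cnt + 1 := by simp; omega
        rw [ha]
        exact ih (i + 1) m prev (cnt + 1) true harg harg2 (by omega)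
    · cases ins with
      | false =>
        have hcnt : cnt = 0 := by
          rcases lt_or_ge 0 cnt with h | h
          · exact absurd (h2.mpr h) (by simp)
          · omega
        have ha : aStep (m, false, cnt) c = (m, false, cnt) := by
          simp [aStep, hc]
        have hb : bStep (m, prev) (i, c) = (m, (i : Int)) := by
          simp only [bStep, ne_eq, hc, not_false_iff, if_true]
          rw [if_neg (by omega)]
        rw [ha, hb]
        exact ih (i + 1) m i cnt false (by push_cast; omega) (by simpa using h2) (by omega)
      | true =>
        have hpos : 0 < cnt := h2.mp rfl
        have ha : aStep (m, true, cnt) c = ((if cnt > m then cnt else m), false, 0) := by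
          simp [aStep, hc]
        have hb : bStep (m, prev) (i, c) = ((if cnt > m then cnt else m), (i : Int)) := by
          simp only [bStep, ne_eq, hc, not_false_iff, if_true]
          have hg : (i : Int) - prev - 1 = cnt := by omega
          rw [hg]
          by_cases h : cnt > m
          · rw [if_pos ⟨h, hpos⟩, if_pos h]
          · rw [if_neg (by tauto), if_neg h]
        rw [ha, hb]
        exact ih (i + 1) (if cnt > m then cnt else m) i 0 false (by push_cast; omega)
          (by simp) (by omega)

-- ===== VERDICT (by name: the statement is the Claim_ definition above) =====
theorem count_max_spaces_spec : Claim_equal_count_max_spaces := by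
  intro line _
  unfold Spec_count_max_spaces count_max_spaces count_max_spaces_alt
  exact key line.toList 0 (-1) (-1) 0 false (by norm_num) (by simp) (by norm_num)
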